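-- pv_equiv track=rewrite | github.com/lebolama/Bischemerisch | analysis/grammar_model.py | build_auto_typical_replacements
-- ===== SOURCE A (Python) =====
-- def build_auto_typical_replacements(pairs, corpus_counter, limit=60):
--     candidates = []
--
--     for hd, bi in pairs:
--         if hd == bi:
--             continue
--         if len(hd) < 4:
--             continue
--         freq = corpus_counter.get(bi, 0)
--         if freq < 2:
--             continue
--         candidates.append((hd, bi, freq))
--
--     candidates.sort(key=lambda x: (x[2], len(x[0])), reverse=True)
--
--     selected = {}
--     for hd, bi, _ in candidates:
--         if hd in selected:
--             continue
--         selected[hd] = bi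
--         if len(selected) >= limit:
--             break
--
--     return selected
-- ===== SOURCE B (Python) =====
-- def build_auto_typical_replacements(pairs, corpus_counter, limit=60):
--     # One pass: per-head best candidate (highest freq, earliest on ties), then
--     # sort only the unique heads; stability is recovered by pre-sorting on the
--     # stored candidate index.
--     best = {}  # hd -> (freq, candidate_index, bi)
--     idx = 0
--     for hd, bi in pairs:
--         if hd == bi or len(hd) < 4:
--             continue
--         freq = corpus_counter.get(bi, 0)
--         if freq < 2:
--             continue
--         cur = best.get(hd)
--         if cur is None or cur[0] < freq:
--             best[hd] = (freq, idx, bi)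
--         idx += 1
--     ranked = sorted(best.items(), key=lambda kv: kv[1][1])
--     ranked.sort(key=lambda kv: (kv[1][0], len(kv[0])), reverse=True)
--     top = ranked[:limit] if limit > 0 else []
--     return {hd: info[2] for hd, info in top}
-- ===== Notes on version B (the rewrite author's own statement) =====
-- stated objective: alternative
-- what changed: Inverts A's sort-then-dedup: one pass builds a dict head -> (best freq, index of that candidate, bi), then only the unique heads are sorted (index pre-sort restores A's stable tie order) and the first limit are taken, instead of sorting all candidates and deduplicating with a break.
-- intended difference: For limit <= 0 with at least one eligible candidate, A still returns one replacement (its break fires only after the first insertion), while B returns the empty dict, which is the intended meaning of a non-positive limit. — e.g. on build_auto_typical_replacements([("abcd", "x")], [("x", 2)], 0): A returns [("abcd", "x")], B returns []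
import Mathlib
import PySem

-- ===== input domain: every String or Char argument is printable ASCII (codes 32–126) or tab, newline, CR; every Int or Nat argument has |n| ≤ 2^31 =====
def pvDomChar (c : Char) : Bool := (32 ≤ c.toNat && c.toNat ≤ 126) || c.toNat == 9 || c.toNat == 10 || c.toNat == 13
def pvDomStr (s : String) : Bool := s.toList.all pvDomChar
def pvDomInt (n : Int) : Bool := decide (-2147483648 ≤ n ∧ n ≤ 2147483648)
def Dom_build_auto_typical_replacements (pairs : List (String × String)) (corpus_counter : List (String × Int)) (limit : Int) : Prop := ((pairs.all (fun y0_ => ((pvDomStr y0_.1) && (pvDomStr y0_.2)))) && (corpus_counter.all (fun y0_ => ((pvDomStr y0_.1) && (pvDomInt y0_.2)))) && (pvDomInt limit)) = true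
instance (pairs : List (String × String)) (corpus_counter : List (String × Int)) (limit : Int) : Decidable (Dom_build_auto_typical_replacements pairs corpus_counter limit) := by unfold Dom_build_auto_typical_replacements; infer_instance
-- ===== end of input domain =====

-- B replaces A's sort-all-candidates-then-dedup-with-break by a one-pass per-head
-- best-candidate dict followed by sorting only the unique heads (alternative
-- decomposition, same observable result for limit ≥ 1; see D_ below for limit ≤ 0).

-- ===== PORT A =====
-- the 'for hd, bi, _ in candidates: … break' selection loop of A
def selLoopA (limit : Int) : List (String × String × Int) → PySem.Dict String String → PySem.Dict String String
  | [], sel => sel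
  | c :: rest, sel =>
    if sel.contains c.1 then selLoopA limit rest sel
    else
      let sel' := sel.insert c.1 c.2.1
      if limit ≤ (sel'.size : Int) then sel' else selLoopA limit rest sel'

def build_auto_typical_replacements (pairs : List (String × String)) (corpus_counter : List (String × Int)) (limit : Int) : List (String × String) :=
  let cc := PySem.Dict.ofList corpus_counter
  let candidates := pairs.foldl (fun acc p =>
    if p.1 == p.2 then acc
    else if PySem.Str.len p.1 < 4 then acc
    else
      let freq := cc.getD p.2 0
      if freq < 2 then acc
      else acc ++ [(p.1, p.2, freq)]) []
  let sortedC := PySem.List.sorted2 candidates (fun x => x.2.2) (fun x => PySem.Str.len x.1) true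
  (selLoopA limit sortedC PySem.Dict.empty).items

-- ===== PORT B =====
-- loop body of B: best[hd] updated on strictly higher freq; idx counts candidates
def bstepB (cc : PySem.Dict String Int) (st : PySem.Dict String (Int × Int × String) × Int) (p : String × String) : PySem.Dict String (Int × Int × String) × Int :=
  if (p.1 == p.2 || decide (PySem.Str.len p.1 < 4)) then st
  else
    let freq := cc.getD p.2 0
    if freq < 2 then st
    else
      let best' := match st.1.get? p.1 with
        | none => st.1.insert p.1 (freq, st.2, p.2)
        | some cur => if cur.1 < freq then st.1.insert p.1 (freq, st.2, p.2) else st.1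
      (best', st.2 + 1)

def build_auto_typical_replacements_alt (pairs : List (String × String)) (corpus_counter : List (String × Int)) (limit : Int) : List (String × String) :=
  let cc := PySem.Dict.ofList corpus_counter
  let st := pairs.foldl (bstepB cc) (PySem.Dict.empty, 0)
  let ranked0 := PySem.List.sorted st.1.items (fun kv => kv.2.2.1) false
  let ranked := PySem.List.sorted2 ranked0 (fun kv => kv.2.1) (fun kv => PySem.Str.len kv.1) true
  let top := if 0 < limit then PySem.List.slice ranked none (some limit) else []
  (top.foldl (fun d kv => d.insert kv.1 kv.2.2.2) PySem.Dict.empty).items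

-- ===== PRECONDITION & SPEC =====
-- For limit ≤ 0 with at least one eligible candidate, A still returns one replacement
-- (its break fires only after the first insertion), while B returns the empty dict,
-- which is the intended meaning of a non-positive limit.
def D_build_auto_typical_replacements (pairs : List (String × String)) (corpus_counter : List (String × Int)) (limit : Int) : Prop :=
  limit ≤ 0 ∧ ∃ p ∈ pairs, p.1 ≠ p.2 ∧ 4 ≤ PySem.Str.len p.1 ∧ 2 ≤ (PySem.Dict.ofList corpus_counter).getD p.2 0
instance (pairs : List (String × String)) (corpus_counter : List (String × Int)) (limit : Int) : Decidable (D_build_auto_typical_replacements pairs corpus_counter limit) := by unfold D_build_auto_typical_replacements; infer_instance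

def Spec_build_auto_typical_replacements (pairs : List (String × String)) (corpus_counter : List (String × Int)) (limit : Int) (out : List (String × String)) : Prop := ¬ D_build_auto_typical_replacements pairs corpus_counter limit → out = build_auto_typical_replacements_alt pairs corpus_counter limit
instance (pairs : List (String × String)) (corpus_counter : List (String × Int)) (limit : Int) (out : List (String × String)) : Decidable (Spec_build_auto_typical_replacements pairs corpus_counter limit out) := by unfold Spec_build_auto_typical_replacements; infer_instance

def pvDiffWitness_build_auto_typical_replacements : (List (String × String)) × (List (String × Int)) × Int := ([("abcd", "x")], [("x", 2)], 0)
def pvDiffWitnessOut_build_auto_typical_replacements : (List (String × String)) × (List (String × String)) := ([("abcd", "x")], [])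

-- ===== CLAIM (what is proved, stated in full; the proofs are below) =====
def Claim_unchanged_build_auto_typical_replacements : Prop := ∀ (pairs : List (String × String)) (corpus_counter : List (String × Int)) (limit : Int), Dom_build_auto_typical_replacements pairs corpus_counter limit → Spec_build_auto_typical_replacements pairs corpus_counter limit (build_auto_typical_replacements pairs corpus_counter limit)
def Claim_changed_build_auto_typical_replacements : Prop := Dom_build_auto_typical_replacements (pvDiffWitness_build_auto_typical_replacements.1) (pvDiffWitness_build_auto_typical_replacements.2.1) (pvDiffWitness_build_auto_typical_replacements.2.2) ∧ D_build_auto_typical_replacements (pvDiffWitness_build_auto_typical_replacements.1) (pvDiffWitness_build_auto_typical_replacements.2.1) (pvDiffWitness_build_auto_typical_replacements.2.2) ∧ build_auto_typical_replacements (pvDiffWitness_build_auto_typical_replacements.1) (pvDiffWitness_build_auto_typical_replacements.2.1) (pvDiffWitness_build_auto_typical_replacements.2.2) = pvDiffWitnessOut_build_auto_typical_replacements.1 ∧ build_auto_typical_replacements_alt (pvDiffWitness_build_auto_typical_replacements.1) (pvDiffWitness_build_auto_typical_replacements.2.1) (pvDiffWitness_build_auto_typical_replacements.2.2) = pvDiffWitnessOut_build_auto_typical_replacements.2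 ∧ pvDiffWitnessOut_build_auto_typical_replacements.1 ≠ pvDiffWitnessOut_build_auto_typical_replacements.2
def Claim_exact_build_auto_typical_replacements : Prop := ∀ (pairs : List (String × String)) (corpus_counter : List (String × Int)) (limit : Int), Dom_build_auto_typical_replacements pairs corpus_counter limit → D_build_auto_typical_replacements pairs corpus_counter limit → build_auto_typical_replacements pairs corpus_counter limit ≠ build_auto_typical_replacements_alt pairs corpus_counter limit

-- ===== LEMMAS AND PROOFS =====

-- the filtered candidate list (hd, bi, freq), as A's first loop produces it
def fcand (look : String → Int) (p : String × String) : Option (String × String × Int) :=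
  if p.1 == p.2 then none
  else if PySem.Str.len p.1 < 4 then none
  else if look p.2 < 2 then none
  else some (p.1, p.2, look p.2)

def candsOf (look : String → Int) (pairs : List (String × String)) : List (String × String × Int) :=
  pairs.filterMap (fcand look)

-- "a must appear strictly before b" in the common target order: key (freq, len) descending,
-- ties by the secondary relation q (stability)
def Rst {α : Type} (k1 k2 : α → Int) (q : α → α → Prop) (a b : α) : Prop :=
  (k1 b < k1 a ∨ (k1 b = k1 a ∧ k2 b < k2 a)) ∨ (k1 a = k1 b ∧ k2 a = k2 b ∧ q a b)

def kfIT (e : Int × (String × String × Int)) : Int := e.2.2.2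
def klIT (e : Int × (String × String × Int)) : Int := PySem.Str.len e.2.1
def rIT (a b : Int × (String × String × Int)) : Prop := Rst kfIT klIT (fun a b => a.1 < b.1) a b

-- per-head winner fold (B's dict fold re-expressed over the enumerated candidates)
def stepW (d : PySem.Dict String (Int × Int × String)) (e : Int × (String × String × Int)) : PySem.Dict String (Int × Int × String) :=
  match d.get? e.2.1 with
  | none => d.insert e.2.1 (e.2.2.2, e.1, e.2.2.1)
  | some cur => if cur.1 < e.2.2.2 then d.insert e.2.1 (e.2.2.2, e.1, e.2.2.1) else d

def phiW (kv : String × (Int × Int × String)) : Int × (String × String × Int) := (kv.2.2.1, (kv.1, kv.2.2.2, kv.2.1))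

-- pure first-occurrence-per-head dedup (what A's selection loop computes, without the limit)
def dedupT : List (String × String × Int) → List String → List (String × String)
  | [], _ => []
  | c :: rest, seen => if c.1 ∈ seen then dedupT rest seen else (c.1, c.2.1) :: dedupT rest (c.1 :: seen)

def dedupGo : List (Int × (String × String × Int)) → List String → List (String × String)
  | [], _ => []
  | e :: rest, seen => if e.2.1 ∈ seen then dedupGo rest seen else (e.2.1, e.2.2.1) :: dedupGo rest (e.2.1 :: seen)

theorem rIT_trans {a b c : Int × (String × String × Int)} (h1 : rIT a b) (h2 : rIT b c) : rIT a c := by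
  unfold rIT Rst kfIT klIT at *; omega

theorem rIT_asymm {a b : Int × (String × String × Int)} (h1 : rIT a b) (h2 : rIT b a) : False := by
  unfold rIT Rst kfIT klIT at *; omega

theorem mem_enumerate_le {α : Type} : ∀ (l : List α) (i : Int), ∀ e ∈ PySem.List.enumerate l i, i ≤ e.1 := by
  intro l
  induction l with
  | nil => intro i e he; simp [PySem.List.enumerate_nil] at he
  | cons x t ih =>
    intro i e he
    rw [PySem.List.enumerate_cons] at he
    rcases List.mem_cons.mp he with he | he
    · simp [he]
    · have := ih (i + 1) e he; omega

theorem pairwise_fst_lt_enumerate {α : Type} : ∀ (l : List α) (i : Int),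
    (PySem.List.enumerate l i).Pairwise (fun a b => a.1 < b.1) := by
  intro l
  induction l with
  | nil => intro i; simp [PySem.List.enumerate_nil]
  | cons x t ih =>
    intro i
    rw [PySem.List.enumerate_cons]
    refine List.Pairwise.cons ?_ (ih (i + 1))
    intro e he
    have := mem_enumerate_le t (i + 1) e he
    simpa using by omega

theorem foldA_eq (cc : PySem.Dict String Int) : ∀ (pairs : List (String × String)) (acc : List (String × String × Int)),
    pairs.foldl (fun acc p =>
      if p.1 == p.2 then acc
      else if PySem.Str.len p.1 < 4 then acc
      else
        let freq := cc.getD p.2 0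
        if freq < 2 then acc
        else acc ++ [(p.1, p.2, freq)]) acc
    = acc ++ candsOf (fun b => cc.getD b 0) pairs := by
  intro pairs
  induction pairs with
  | nil => intro acc; simp [candsOf]
  | cons p t ih =>
    intro acc
    rw [List.foldl_cons, ih]
    simp only [candsOf, List.filterMap_cons]
    rw [fcand]
    split_ifs <;> simp

theorem candsOf_eq_nil_iff (look : String → Int) (pairs : List (String × String)) :
    candsOf look pairs = [] ↔ ¬ ∃ p ∈ pairs, p.1 ≠ p.2 ∧ 4 ≤ PySem.Str.len p.1 ∧ 2 ≤ look p.2 := by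
  rw [candsOf, List.filterMap_eq_nil_iff]
  constructor
  · rintro h ⟨p, hp, hne, hlen, hfreq⟩
    have := h p hp
    rw [fcand] at this
    split_ifs at this with h1 h2 h3
    · exact hne (by simpa using h1)
    · omega
    · omega
  · intro h p hp
    rw [fcand]
    split_ifs with h1 h2 h3
    · rfl
    · rfl
    · rfl
    · exact absurd ⟨p, hp, by simpa using h1, by omega, by omega⟩ h

theorem dedupT_map_snd : ∀ (ls : List (Int × (String × String × Int))) (seen : List String),
    dedupT (ls.map Prod.snd) seen = dedupGo ls seen := by
  intro ls
  induction ls with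
  | nil => intro seen; rfl
  | cons e t ih => intro seen; simp only [List.map_cons, dedupT, dedupGo, ih]

theorem dedupT_congr : ∀ (ls : List (String × String × Int)) (s1 s2 : List String),
    (∀ h, h ∈ s1 ↔ h ∈ s2) → dedupT ls s1 = dedupT ls s2 := by
  intro ls
  induction ls with
  | nil => intro _ _ _; rfl
  | cons c t ih =>
    intro s1 s2 hs
    simp only [dedupT]
    by_cases hc : c.1 ∈ s1
    · rw [if_pos hc, if_pos ((hs c.1).mp hc), ih _ _ hs]
    · rw [if_neg hc, if_neg (fun h => hc ((hs c.1).mpr h))]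
      congr 1
      refine ih _ _ ?_
      intro h; simp [hs h]

-- the insertion predicate sorted2 uses for reverse=True
def bfun {α : Type} (k1 k2 : α → Int) (a b : α) : Bool :=
  decide (k1 b < k1 a) || (!decide (k1 a < k1 b) && decide (k2 b < k2 a))

theorem sorted2_true_eq {α : Type} (k1 k2 : α → Int) (l : List α) :
    PySem.List.sorted2 l k1 k2 true = l.foldl (fun acc x => PySem.List.insertBy (bfun k1 k2) x acc) [] := rfl

theorem insertBy_stable {α : Type} (k1 k2 : α → Int) (q : α → α → Prop) (x : α) :
    ∀ acc : List α, acc.Pairwise (Rst k1 k2 q) → (∀ y ∈ acc, q y x) →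
    (PySem.List.insertBy (bfun k1 k2) x acc).Pairwise (Rst k1 k2 q) := by
  intro acc
  induction acc with
  | nil => intro _ _; simp [PySem.List.insertBy]
  | cons y ys ih =>
    intro hpw hq
    have hy : ∀ z ∈ ys, Rst k1 k2 q y z := fun z hz => List.rel_of_pairwise_cons hpw hz
    have hpys : ys.Pairwise (Rst k1 k2 q) := hpw.of_cons
    simp only [PySem.List.insertBy]
    by_cases hb : bfun k1 k2 x y = true
    · rw [if_pos hb]
      have hxy : k1 y < k1 x ∨ (k1 y = k1 x ∧ k2 y < k2 x) := by
        simp only [bfun, Bool.or_eq_true, Bool.and_eq_true, Bool.not_eq_true', decide_eq_true_eq,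
          decide_eq_false_iff_not] at hb
        omega
      refine List.Pairwise.cons ?_ hpw
      intro z hz
      rcases List.mem_cons.mp hz with rfl | hz
      · exact Or.inl hxy
      · rcases hy z hz with (h | h) | ⟨e1, e2, _⟩
        · exact Or.inl (by unfold Rst at *; omega)
        · exact Or.inl (by unfold Rst at *; omega)
        · exact Or.inl (by omega)
    · rw [if_neg hb]
      have hb' : ¬ (k1 y < k1 x ∨ (¬ k1 x < k1 y ∧ k2 y < k2 x)) := by
        simp only [bfun, Bool.or_eq_true, Bool.and_eq_true, Bool.not_eq_true', decide_eq_true_eq,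
          decide_eq_false_iff_not] at hb
        omega
      refine List.Pairwise.cons ?_ (ih hpys (fun z hz => hq z (List.mem_cons_of_mem _ hz)))
      intro z hz
      rcases (PySem.List.mem_insertBy _ _ _ _).mp hz with rfl | hz
      · by_cases hk : k1 z = k1 y ∧ k2 z = k2 y
        · exact Or.inr ⟨hk.1.symm, hk.2.symm, hq y List.mem_cons_self⟩
        · exact Or.inl (by omega)
      · exact hy z hz

theorem foldl_insertBy_stable {α : Type} (k1 k2 : α → Int) (q : α → α → Prop) :
    ∀ (l acc : List α), l.Pairwise q → acc.Pairwise (Rst k1 k2 q) →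
    (∀ y ∈ acc, ∀ x ∈ l, q y x) →
    (l.foldl (fun acc x => PySem.List.insertBy (bfun k1 k2) x acc) acc).Pairwise (Rst k1 k2 q) := by
  intro l
  induction l with
  | nil => intro acc _ h _; exact h
  | cons x t ih =>
    intro acc hl hacc hcross
    rw [List.foldl_cons]
    refine ih _ hl.of_cons (insertBy_stable k1 k2 q x acc hacc (fun y hy => hcross y hy x List.mem_cons_self)) ?_
    intro y hy z hz
    rcases (PySem.List.mem_insertBy _ _ _ _).mp hy with rfl | hy
    · exact List.rel_of_pairwise_cons hl hz
    · exact hcross y hy z (List.mem_cons_of_mem _ hz)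

theorem sorted2_stable {α : Type} (k1 k2 : α → Int) (q : α → α → Prop) (l : List α)
    (hl : l.Pairwise q) : (PySem.List.sorted2 l k1 k2 true).Pairwise (Rst k1 k2 q) := by
  rw [sorted2_true_eq]
  exact foldl_insertBy_stable k1 k2 q l [] hl List.Pairwise.nil (by simp)

theorem insertBy_map {α β : Type} (f : β → α) (bb : β → β → Bool) (ba : α → α → Bool)
    (h : ∀ x y, bb x y = ba (f x) (f y)) (x : β) : ∀ acc : List β,
    (PySem.List.insertBy bb x acc).map f = PySem.List.insertBy ba (f x) (acc.map f) := by
  intro acc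
  induction acc with
  | nil => simp [PySem.List.insertBy]
  | cons y ys ih =>
    simp only [PySem.List.insertBy, List.map_cons]
    rw [h x y]
    by_cases hb : ba (f x) (f y) = true
    · rw [if_pos hb, if_pos hb]; simp
    · rw [if_neg hb, if_neg hb]; simp [ih]

theorem foldl_insertBy_map {α β : Type} (f : β → α) (bb : β → β → Bool) (ba : α → α → Bool)
    (h : ∀ x y, bb x y = ba (f x) (f y)) :
    ∀ (l accb : List β),
    (l.foldl (fun a x => PySem.List.insertBy bb x a) accb).map f
      = (l.map f).foldl (fun a x => PySem.List.insertBy ba x a) (accb.map f) := by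
  intro l
  induction l with
  | nil => intro accb; rfl
  | cons x t ih =>
    intro accb
    rw [List.foldl_cons, List.map_cons, List.foldl_cons, ih, insertBy_map f bb ba h]

theorem sorted2_map {α β : Type} (f : β → α) (k1 k2 : α → Int) (l : List β) :
    (PySem.List.sorted2 l (fun e => k1 (f e)) (fun e => k2 (f e)) true).map f
      = PySem.List.sorted2 (l.map f) k1 k2 true := by
  rw [sorted2_true_eq, sorted2_true_eq]
  exact foldl_insertBy_map f (bfun (fun e => k1 (f e)) (fun e => k2 (f e))) (bfun k1 k2) (fun x y => rfl) l []

theorem winner_inv : ∀ (E : List (Int × (String × String × Int))),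
    E.Pairwise (fun a b => a.1 < b.1) →
    (E.foldl stepW PySem.Dict.empty).keys.Nodup ∧
    (∀ hd v, (E.foldl stepW PySem.Dict.empty).get? hd = some v →
      phiW (hd, v) ∈ E ∧ ∀ e ∈ E, e.2.1 = hd → e = phiW (hd, v) ∨ rIT (phiW (hd, v)) e) ∧
    (∀ e ∈ E, ∃ v, (E.foldl stepW PySem.Dict.empty).get? e.2.1 = some v) := by
  intro E
  induction E using List.reverseRecOn with
  | nil =>
    intro _
    simp only [List.foldl_nil]
    refine ⟨PySem.Dict.nodup_keys_empty, ?_, ?_⟩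
    · intro hd v h; rw [PySem.Dict.get?_empty] at h; exact absurd h (by simp)
    · intro e he; exact absurd he (by simp)
  | append_singleton E' e ih =>
    intro hpw
    obtain ⟨hpw', -, hcross'⟩ := List.pairwise_append.mp hpw
    have hcross : ∀ a ∈ E', a.1 < e.1 := fun a ha => hcross' a ha e (by simp)
    obtain ⟨hnd, hW, hT⟩ := ih hpw'
    rw [List.foldl_append, List.foldl_cons, List.foldl_nil]
    set d' := E'.foldl stepW PySem.Dict.empty with hd'
    -- the new element is not yet in E'
    have heE' : e ∉ E' := fun h => absurd (hcross e h) (by omega)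
    rcases hg : d'.get? e.2.1 with _ | cur
    · -- new head
      have hnokey : ∀ e' ∈ E', e'.2.1 ≠ e.2.1 := by
        intro e' he' hcontra
        obtain ⟨v, hv⟩ := hT e' he'
        rw [hcontra, hg] at hv; exact absurd hv (by simp)
      refine ⟨?_, ?_, ?_⟩ <;> simp only [stepW, hg]
      · exact PySem.Dict.nodup_keys_insert _ _ _ hnd
      · intro hd v hv
        by_cases hhd : hd = e.2.1
        · subst hhd
          rw [PySem.Dict.get?_insert_self] at hv
          obtain rfl : v = (e.2.2.2, e.1, e.2.2.1) := by injection hv with h; exact h.symm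
          have hphi : phiW (e.2.1, (e.2.2.2, e.1, e.2.2.1)) = e := rfl
          rw [hphi]
          refine ⟨by simp, ?_⟩
          intro e' he' hhd'
          rcases List.mem_append.mp he' with he' | he'
          · exact absurd hhd' (hnokey e' he')
          · left; simpa using he'
        · rw [PySem.Dict.get?_insert_of_ne _ _ hhd] at hv
          obtain ⟨hmem, hbeat⟩ := hW hd v hv
          refine ⟨List.mem_append.mpr (Or.inl hmem), ?_⟩
          intro e' he' hhd'
          rcases List.mem_append.mp he' with he' | he'
          · exact hbeat e' he' hhd'
          · obtain rfl : e' = e := by simpa using he'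
            exact absurd hhd'.symm hhd
      · intro e' he'
        rcases List.mem_append.mp he' with he' | he'
        · obtain ⟨v, hv⟩ := hT e' he'
          by_cases hh : e'.2.1 = e.2.1
          · exact ⟨_, by rw [hh, PySem.Dict.get?_insert_self]⟩
          · exact ⟨v, by rw [PySem.Dict.get?_insert_of_ne _ _ hh]; exact hv⟩
        · obtain rfl : e' = e := by simpa using he'
          exact ⟨_, by rw [PySem.Dict.get?_insert_self]⟩
    · -- head already present, previous winner cur
      obtain ⟨hwmem, hwbeat⟩ := hW e.2.1 cur hg
      by_cases hlt : cur.1 < e.2.2.2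
      · -- new candidate strictly better: overwrite
        have hphi : phiW (e.2.1, (e.2.2.2, e.1, e.2.2.1)) = e := rfl
        have hbeatw : rIT e (phiW (e.2.1, cur)) := by
          unfold rIT Rst kfIT klIT phiW; left; left; simpa using hlt
        refine ⟨?_, ?_, ?_⟩ <;> simp only [stepW, hg] <;> rw [if_pos hlt]
        · exact PySem.Dict.nodup_keys_insert _ _ _ hnd
        · intro hd v hv
          by_cases hhd : hd = e.2.1
          · subst hhd
            rw [PySem.Dict.get?_insert_self] at hv
            obtain rfl : v = (e.2.2.2, e.1, e.2.2.1) := by injection hv with h; exact h.symm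
            rw [hphi]
            refine ⟨by simp, ?_⟩
            intro e' he' hhd'
            rcases List.mem_append.mp he' with he' | he'
            · rcases hwbeat e' he' hhd' with rfl | hr
              · exact Or.inr hbeatw
              · exact Or.inr (rIT_trans hbeatw hr)
            · left; simpa using he'
          · rw [PySem.Dict.get?_insert_of_ne _ _ hhd] at hv
            obtain ⟨hmem, hbeat⟩ := hW hd v hv
            refine ⟨List.mem_append.mpr (Or.inl hmem), ?_⟩
            intro e' he' hhd'
            rcases List.mem_append.mp he' with he' | he'
            · exact hbeat e' he' hhd'
            · obtain rfl : e' = e := by simpa using he'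
              exact absurd hhd'.symm hhd
        · intro e' he'
          rcases List.mem_append.mp he' with he' | he'
          · obtain ⟨v, hv⟩ := hT e' he'
            by_cases hh : e'.2.1 = e.2.1
            · exact ⟨_, by rw [hh, PySem.Dict.get?_insert_self]⟩
            · exact ⟨v, by rw [PySem.Dict.get?_insert_of_ne _ _ hh]; exact hv⟩
          · obtain rfl : e' = e := by simpa using he'
            exact ⟨_, by rw [PySem.Dict.get?_insert_self]⟩
      · -- old winner stays
        refine ⟨?_, ?_, ?_⟩ <;> simp only [stepW, hg] <;> rw [if_neg hlt]
        · exact hnd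
        · intro hd v hv
          obtain ⟨hmem, hbeat⟩ := hW hd v hv
          refine ⟨List.mem_append.mpr (Or.inl hmem), ?_⟩
          intro e' he' hhd'
          rcases List.mem_append.mp he' with he' | he'
          · exact hbeat e' he' hhd'
          · have hee : e' = e := by simpa using he'
            rw [hee] at hhd' ⊢
            by_cases hhd : hd = e.2.1
            · subst hhd
              have hvc : cur = v := Option.some.inj (hg.symm.trans hv)
              right
              have hidx : cur.2.1 < e.1 := hcross _ hwmem
              rw [← hvc]
              unfold rIT Rst kfIT klIT phiW
              simp only
              exact (not_lt.mp hlt).lt_or_eq.elim (fun h => Or.inl (Or.inl h))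
                (fun h => Or.inr ⟨h.symm, trivial, hidx⟩)
            · exact absurd hhd'.symm hhd
        · intro e' he'
          rcases List.mem_append.mp he' with he' | he'
          · exact hT e' he'
          · obtain rfl : e' = e := by simpa using he'
            exact ⟨cur, hg⟩

theorem dedupGo_filter (E W : List (Int × (String × String × Int)))
    (hWhd : ∀ w ∈ W, ∀ w' ∈ W, w.2.1 = w'.2.1 → w = w')
    (hWin : ∀ w ∈ W, ∀ e ∈ E, e.2.1 = w.2.1 → e = w ∨ rIT w e) :
    ∀ (ls : List (Int × (String × String × Int))) (seen : List String),
    ls.Pairwise rIT → ls.Nodup → (∀ e ∈ ls, e ∈ E) →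
    (∀ e ∈ ls, e.2.1 ∉ seen → ∃ w ∈ W, w.2.1 = e.2.1 ∧ w ∈ ls) →
    dedupGo ls seen
      = (ls.filter (fun e => decide (e ∈ W) && decide (e.2.1 ∉ seen))).map (fun e => (e.2.1, e.2.2.1)) := by
  intro ls
  induction ls with
  | nil => intro seen _ _ _ _; rfl
  | cons e rest ih =>
    intro seen hpw hnd hE hH
    have hpwr : rest.Pairwise rIT := hpw.of_cons
    have hndr : rest.Nodup := hnd.of_cons
    have henr : e ∉ rest := (List.nodup_cons.mp hnd).1
    by_cases hseen : e.2.1 ∈ seen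
    · rw [dedupGo, if_pos hseen, List.filter_cons_of_neg (by simp [hseen])]
      refine ih seen hpwr hndr (fun x hx => hE x (List.mem_cons_of_mem _ hx)) ?_
      intro x hx hxs
      obtain ⟨w, hwW, hwhd, hwls⟩ := hH x (List.mem_cons_of_mem _ hx) hxs
      refine ⟨w, hwW, hwhd, ?_⟩
      rcases List.mem_cons.mp hwls with rfl | hwr
      · exact absurd (hwhd ▸ hseen) hxs
      · exact hwr
    · have heW : e ∈ W := by
        obtain ⟨w, hwW, hwhd, hwls⟩ := hH e List.mem_cons_self hseen
        rcases List.mem_cons.mp hwls with rfl | hwr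
        · exact hwW
        · exfalso
          have hew : rIT e w := List.rel_of_pairwise_cons hpw hwr
          rcases hWin w hwW e (hE e List.mem_cons_self) hwhd.symm with rfl | hwe
          · exact henr hwr
          · exact rIT_asymm hew hwe
      rw [dedupGo, if_neg hseen, List.filter_cons_of_pos (by simp [heW, hseen]), List.map_cons]
      congr 1
      have hne : ∀ x ∈ rest, x ∈ W → x.2.1 ∉ seen → x.2.1 ≠ e.2.1 := by
        intro x hx hxW _ hcontra
        exact henr ((hWhd x hxW e heW hcontra) ▸ hx)
      rw [ih (e.2.1 :: seen) hpwr hndr (fun x hx => hE x (List.mem_cons_of_mem _ hx)) ?hH']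
      case hH' =>
        intro x hx hxs
        have hxs' : x.2.1 ∉ seen := fun h => hxs (List.mem_cons_of_mem _ h)
        obtain ⟨w, hwW, hwhd, hwls⟩ := hH x (List.mem_cons_of_mem _ hx) hxs'
        refine ⟨w, hwW, hwhd, ?_⟩
        rcases List.mem_cons.mp hwls with rfl | hwr
        · exact absurd (by simp [hwhd]) hxs
        · exact hwr
      congr 1
      refine List.filter_congr ?_
      intro x hx
      by_cases hxW : x ∈ W
      · by_cases hxs : x.2.1 ∈ seen
        · simp [hxW, hxs]
        · simp [hxW, hxs, hne x hx hxW hxs]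
      · simp [hxW]

theorem selLoop_items (limit : Int) : ∀ (ls : List (String × String × Int)) (sel : PySem.Dict String String),
    sel.keys.Nodup → (sel.size : Int) < limit →
    (selLoopA limit ls sel).items = sel.items ++ (dedupT ls sel.keys).take (limit.toNat - sel.size) := by
  intro ls
  induction ls with
  | nil => intro sel _ _; simp [selLoopA, dedupT]
  | cons c rest ih =>
    intro sel hnd hsz
    simp only [selLoopA]
    by_cases hc : sel.contains c.1 = true
    · rw [if_pos hc, ih sel hnd hsz, dedupT, if_pos ((PySem.Dict.contains_iff_mem_keys _ _).mp hc)]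
    · rw [if_neg hc]
      have hkm : c.1 ∉ sel.keys := fun h => hc ((PySem.Dict.contains_iff_mem_keys _ _).mpr h)
      have hitems : (sel.insert c.1 c.2.1).items = sel.items ++ [(c.1, c.2.1)] := by
        simp [PySem.Dict.insert, hc]
      have hkeys : (sel.insert c.1 c.2.1).keys = sel.keys ++ [c.1] := by
        simp only [PySem.Dict.keys, hitems, List.map_append, List.map_cons, List.map_nil]
      have hsize : (sel.insert c.1 c.2.1).size = sel.size + 1 := by
        simp [PySem.Dict.size, hitems]
      have hddt : dedupT (c :: rest) sel.keys = (c.1, c.2.1) :: dedupT rest (c.1 :: sel.keys) := by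
        rw [dedupT, if_neg hkm]
      by_cases hlim : limit ≤ ((sel.insert c.1 c.2.1).size : Int)
      · rw [if_pos hlim, hitems, hddt]
        have h1 : limit.toNat - sel.size = 1 := by rw [hsize] at hlim; omega
        rw [h1, List.take_succ_cons, List.take_zero]
      · rw [if_neg hlim]
        rw [ih _ (PySem.Dict.nodup_keys_insert _ _ _ hnd) (by omega), hitems, hkeys, hsize, hddt]
        rw [dedupT_congr rest (sel.keys ++ [c.1]) (c.1 :: sel.keys) (by intro h; simp; tauto)]
        obtain ⟨m, hm⟩ : ∃ m, limit.toNat - sel.size = m + 1 := ⟨limit.toNat - sel.size - 1, by omega⟩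
        have hm' : limit.toNat - (sel.size + 1) = m := by omega
        rw [hm, hm', List.take_succ_cons, List.append_assoc, List.singleton_append]

theorem foldInsert_items : ∀ (l : List (String × Int × Int × String)) (d : PySem.Dict String String),
    (∀ kv ∈ l, kv.1 ∉ d.keys) → (l.map Prod.fst).Nodup →
    (l.foldl (fun d kv => d.insert kv.1 kv.2.2.2) d).items = d.items ++ l.map (fun kv => (kv.1, kv.2.2.2)) := by
  intro l
  induction l with
  | nil => intro d _ _; simp
  | cons kv t ih =>
    intro d hfresh hmn
    have hc : d.contains kv.1 = false := by
      rcases h : d.contains kv.1 with _ | _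
      · rfl
      · exact absurd ((PySem.Dict.contains_iff_mem_keys _ _).mp h) (hfresh kv List.mem_cons_self)
    have hitems : (d.insert kv.1 kv.2.2.2).items = d.items ++ [(kv.1, kv.2.2.2)] := by
      simp [PySem.Dict.insert, hc]
    have hkeys : (d.insert kv.1 kv.2.2.2).keys = d.keys ++ [kv.1] := by
      simp only [PySem.Dict.keys, hitems, List.map_append, List.map_cons, List.map_nil]
    rw [List.foldl_cons, ih _ ?fresh ?nd, hitems, List.map_cons, List.append_assoc,
      List.singleton_append]
    case fresh =>
      intro x hx
      rw [hkeys]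
      simp only [List.mem_append, List.mem_singleton]
      rintro (h | h)
      · exact hfresh x (List.mem_cons_of_mem _ hx) h
      · have : x.1 ∈ t.map Prod.fst := List.mem_map_of_mem hx
        rw [List.map_cons] at hmn
        exact (List.nodup_cons.mp hmn).1 (h ▸ this)
    case nd => rw [List.map_cons] at hmn; exact hmn.of_cons

theorem bfold_eq (cc : PySem.Dict String Int) : ∀ (pairs : List (String × String))
    (d : PySem.Dict String (Int × Int × String)) (i : Int),
    pairs.foldl (bstepB cc) (d, i)
      = ((PySem.List.enumerate (candsOf (fun b => cc.getD b 0) pairs) i).foldl stepW d,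
         i + ((candsOf (fun b => cc.getD b 0) pairs).length : Int)) := by
  intro pairs
  induction pairs with
  | nil => intro d i; simp [candsOf, PySem.List.enumerate_nil]
  | cons p t ih =>
    intro d i
    rw [List.foldl_cons]
    by_cases h1 : (p.1 == p.2 || decide (PySem.Str.len p.1 < 4)) = true
    · have hf : fcand (fun b => cc.getD b 0) p = none := by
        simp only [Bool.or_eq_true, beq_iff_eq, decide_eq_true_eq] at h1
        rw [fcand]
        split_ifs with a b c
        · rfl
        · rfl
        · rfl
        · exfalso
          rcases h1 with h | h
          · exact absurd (by simpa using h) a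
          · exact b h
      have hcs : candsOf (fun b => cc.getD b 0) (p :: t) = candsOf (fun b => cc.getD b 0) t := by
        simp [candsOf, hf]
      have hstep : bstepB cc (d, i) p = (d, i) := by rw [bstepB, if_pos h1]
      rw [hstep, ih, hcs]
    · by_cases h2 : cc.getD p.2 0 < 2
      · have hf : fcand (fun b => cc.getD b 0) p = none := by
          simp only [Bool.or_eq_true, beq_iff_eq, decide_eq_true_eq, not_or] at h1
          rw [fcand, if_neg (by simpa using h1.1), if_neg h1.2, if_pos h2]
        have hcs : candsOf (fun b => cc.getD b 0) (p :: t) = candsOf (fun b => cc.getD b 0) t := by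
          simp [candsOf, hf]
        have hstep : bstepB cc (d, i) p = (d, i) := by
          rw [bstepB, if_neg h1]
          simp only [if_pos h2]
        rw [hstep, ih, hcs]
      · have hf : fcand (fun b => cc.getD b 0) p = some (p.1, p.2, cc.getD p.2 0) := by
          simp only [Bool.or_eq_true, beq_iff_eq, decide_eq_true_eq, not_or] at h1
          rw [fcand, if_neg (by simpa using h1.1), if_neg h1.2, if_neg h2]
        have hcs : candsOf (fun b => cc.getD b 0) (p :: t)
            = (p.1, p.2, cc.getD p.2 0) :: candsOf (fun b => cc.getD b 0) t := by
          simp [candsOf, hf]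
        have hstep : bstepB cc (d, i) p = (stepW d (i, (p.1, p.2, cc.getD p.2 0)), i + 1) := by
          rw [bstepB, if_neg h1]
          simp only [if_neg h2]
          rfl
        rw [hstep, ih, hcs, PySem.List.enumerate_cons, List.foldl_cons]
        refine Prod.ext rfl ?_
        simp only [List.length_cons]
        push_cast
        ring

theorem phiW_inj : Function.Injective phiW := by
  intro a b h
  calc a = ((phiW a).2.1, ((phiW a).2.2.2, (phiW a).1, (phiW a).2.2.1)) := rfl
    _ = ((phiW b).2.1, ((phiW b).2.2.2, (phiW b).1, (phiW b).2.2.1)) := by rw [h]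
    _ = b := rfl

theorem mem_items_of_get? {ν : Type} (d : PySem.Dict String ν) (hd : String) (v : ν)
    (h : d.get? hd = some v) : (hd, v) ∈ d.items := by
  simp only [PySem.Dict.get?, Option.map_eq_some_iff] at h
  obtain ⟨p, hp, hv⟩ := h
  have hm := List.mem_of_find?_eq_some hp
  have he : p.1 = hd := by simpa using List.find?_some hp
  have : (hd, v) = p := by rw [← he, ← hv]
  rw [this]; exact hm

theorem main_equiv (pairs : List (String × String)) (corpus_counter : List (String × Int))
    (limit : Int) (hlim : 0 < limit) :
    build_auto_typical_replacements pairs corpus_counter limit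
      = build_auto_typical_replacements_alt pairs corpus_counter limit := by
  simp only [build_auto_typical_replacements, build_auto_typical_replacements_alt]
  rw [foldA_eq (PySem.Dict.ofList corpus_counter) pairs [], List.nil_append,
    bfold_eq (PySem.Dict.ofList corpus_counter) pairs PySem.Dict.empty 0]
  dsimp only
  set cc := PySem.Dict.ofList corpus_counter with hccdef
  set C := candsOf (fun b => cc.getD b 0) pairs with hC
  set EE := PySem.List.enumerate C 0 with hEE
  set d := EE.foldl stepW PySem.Dict.empty with hdd
  set W := d.items.map phiW with hWdef
  set SE := PySem.List.sorted2 EE (fun e => e.2.2.2) (fun e => PySem.Str.len e.2.1) true with hSEdef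
  set ranked0 := PySem.List.sorted d.items (fun kv => kv.2.2.1) false with hr0def
  set ranked := PySem.List.sorted2 ranked0 (fun kv => kv.2.1) (fun kv => PySem.Str.len kv.1) true with hrkdef
  -- enumerate facts
  have hEpw : EE.Pairwise (fun a b => a.1 < b.1) := pairwise_fst_lt_enumerate C 0
  have hEEnd : EE.Nodup := hEpw.imp (fun {a b} h => fun he => by rw [he] at h; exact lt_irrefl _ h)
  -- winner facts
  obtain ⟨hnd, hW, hT⟩ := winner_inv EE hEpw
  have hndm : (d.items.map (fun p => p.1)).Nodup := hnd
  have hitemsnd : d.items.Nodup := List.Nodup.of_map (fun p => p.1) hndm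
  have hWnd : W.Nodup := hitemsnd.map phiW_inj
  have hWget : ∀ w ∈ W, d.get? w.2.1 = some (w.2.2.2, w.1, w.2.2.1) := by
    intro w hw
    obtain ⟨kv, hkv, rfl⟩ := List.mem_map.mp hw
    exact PySem.Dict.get?_of_mem_items d hkv hnd
  have hWE : ∀ w ∈ W, w ∈ EE := fun w hw => (hW w.2.1 _ (hWget w hw)).1
  have hWin : ∀ w ∈ W, ∀ e ∈ EE, e.2.1 = w.2.1 → e = w ∨ rIT w e :=
    fun w hw => (hW w.2.1 _ (hWget w hw)).2
  have hWhd : ∀ w ∈ W, ∀ w' ∈ W, w.2.1 = w'.2.1 → w = w' := by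
    intro w hw w' hw' hhd
    have h1 := hWget w hw
    have h2 := hWget w' hw'
    rw [hhd] at h1
    have h3 := Option.some.inj (h1.symm.trans h2)
    have h4 : ((w.2.1, (w.2.2.2, w.1, w.2.2.1)) : String × Int × Int × String)
        = (w'.2.1, (w'.2.2.2, w'.1, w'.2.2.1)) := by rw [hhd, h3]
    calc w = phiW (w.2.1, (w.2.2.2, w.1, w.2.2.1)) := rfl
      _ = phiW (w'.2.1, (w'.2.2.2, w'.1, w'.2.2.1)) := by rw [h4]
      _ = w' := rfl
  have hTW : ∀ e ∈ EE, ∃ w ∈ W, w.2.1 = e.2.1 := by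
    intro e he
    obtain ⟨v, hv⟩ := hT e he
    exact ⟨phiW (e.2.1, v), List.mem_map_of_mem (mem_items_of_get? d _ _ hv), rfl⟩
  -- the sorted enumerated candidates
  have hSEpw : SE.Pairwise rIT := by
    have h := sorted2_stable (fun e : Int × (String × String × Int) => e.2.2.2)
      (fun e : Int × (String × String × Int) => PySem.Str.len e.2.1)
      (fun a b : Int × (String × String × Int) => a.1 < b.1) EE hEpw
    exact h.imp (fun {a b} hh => hh)
  have hSEperm : SE.Perm EE := PySem.List.sorted2_perm EE _ _ true
  have hSEnd : SE.Nodup := hSEperm.nodup_iff.mpr hEEnd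
  -- index keys are distinct
  have hfstEEnd : (EE.map (fun e => e.1)).Nodup :=
    (List.pairwise_map.mpr hEpw).imp (fun {a b} h => ne_of_lt h)
  have hfstWnd : (W.map (fun w => w.1)).Nodup := by
    refine List.Nodup.map_on ?_ hWnd
    intro x hx y hy h
    exact List.inj_on_of_nodup_map hfstEEnd (hWE x hx) (hWE y hy) h
  have hidxnd : (d.items.map (fun kv => kv.2.2.1)).Nodup := by
    have h := hfstWnd
    rw [hWdef, List.map_map] at h
    exact h
  -- B's double sort is rIT-sorted
  have hr0perm : ranked0.Perm d.items := PySem.List.sorted_perm d.items _ false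
  have hr0le : ranked0.Pairwise (fun a b => a.2.2.1 ≤ b.2.2.1) :=
    PySem.List.sorted_pairwise d.items (fun kv => kv.2.2.1)
  have hr0idxnd : (ranked0.map (fun kv => kv.2.2.1)).Nodup :=
    ((hr0perm.map (fun kv => kv.2.2.1)).nodup_iff).mpr hidxnd
  have hr0ne : ranked0.Pairwise (fun a b => a.2.2.1 ≠ b.2.2.1) := List.pairwise_map.mp hr0idxnd
  have hr0lt : ranked0.Pairwise (fun a b => a.2.2.1 < b.2.2.1) :=
    (hr0le.and hr0ne).imp (fun {a b} h => lt_of_le_of_ne h.1 h.2)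
  have hrkpw : ranked.Pairwise (Rst (fun kv => kv.2.1) (fun kv => PySem.Str.len kv.1)
      (fun a b => a.2.2.1 < b.2.2.1)) := by
    have h := sorted2_stable (fun kv : String × Int × Int × String => kv.2.1)
      (fun kv : String × Int × Int × String => PySem.Str.len kv.1)
      (fun a b : String × Int × Int × String => a.2.2.1 < b.2.2.1) ranked0 hr0lt
    exact h
  have hREpw : (ranked.map phiW).Pairwise rIT := List.pairwise_map.mpr (hrkpw.imp (fun {a b} hh => hh))
  have hrkperm : ranked.Perm ranked0 := PySem.List.sorted2_perm ranked0 _ _ true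
  -- the filtered sorted list equals B's ranked list
  have hfilpw : (SE.filter (fun e => decide (e ∈ W) && decide (e.2.1 ∉ ([] : List String)))).Pairwise rIT :=
    List.Pairwise.sublist List.filter_sublist hSEpw
  have hpermchain : (SE.filter (fun e => decide (e ∈ W) && decide (e.2.1 ∉ ([] : List String)))).Perm (ranked.map phiW) := by
    have s1 : (SE.filter (fun e => decide (e ∈ W) && decide (e.2.1 ∉ ([] : List String)))).Perm
        (EE.filter (fun e => decide (e ∈ W) && decide (e.2.1 ∉ ([] : List String)))) :=
      hSEperm.filter _
    have s2 : EE.filter (fun e => decide (e ∈ W) && decide (e.2.1 ∉ ([] : List String)))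
        = EE.filter (fun e => decide (e ∈ W)) := by
      refine List.filter_congr ?_
      intro x _; simp
    have s3 : (EE.filter (fun e => decide (e ∈ W))).Perm W := by
      refine List.perm_of_nodup_nodup_toFinset_eq (hEEnd.filter _) hWnd ?_
      ext x
      simp only [List.mem_toFinset, List.mem_filter, decide_eq_true_eq]
      exact ⟨fun h => h.2, fun h => ⟨hWE x h, h⟩⟩
    have s4 : (ranked.map phiW).Perm W := (hrkperm.trans hr0perm).map phiW
    exact ((s1.trans (s2 ▸ List.Perm.refl _)).trans s3).trans s4.symm
  have hfil_eq : SE.filter (fun e => decide (e ∈ W) && decide (e.2.1 ∉ ([] : List String)))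
      = ranked.map phiW :=
    List.Perm.eq_of_pairwise (fun a b _ _ h1 h2 => (rIT_asymm h1 h2).elim) hfilpw hREpw hpermchain
  -- A's dedup output = B's ranked list
  have hmapsnd : SE.map (fun e => e.2)
      = PySem.List.sorted2 C (fun x => x.2.2) (fun x => PySem.Str.len x.1) true := by
    have h := sorted2_map (fun e : Int × (String × String × Int) => e.2)
      (fun x : String × String × Int => x.2.2) (fun x : String × String × Int => PySem.Str.len x.1) EE
    rw [hSEdef, h, PySem.List.map_snd_enumerate]
  have hdedup : dedupT (PySem.List.sorted2 C (fun x => x.2.2) (fun x => PySem.Str.len x.1) true) []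
      = (ranked.map phiW).map (fun e => (e.2.1, e.2.2.1)) := by
    rw [← hmapsnd, dedupT_map_snd SE []]
    rw [dedupGo_filter EE W hWhd hWin SE [] hSEpw hSEnd (fun e he => hSEperm.mem_iff.mp he) ?_,
      hfil_eq]
    intro e he _
    obtain ⟨w, hwW, hwhd⟩ := hTW e (hSEperm.mem_iff.mp he)
    exact ⟨w, hwW, hwhd, hSEperm.mem_iff.mpr (hWE w hwW)⟩
  have hmapmap : (ranked.map phiW).map (fun e => (e.2.1, e.2.2.1))
      = ranked.map (fun kv => (kv.1, kv.2.2.2)) := by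
    rw [List.map_map]; rfl
  -- A's side
  rw [selLoop_items limit _ PySem.Dict.empty List.nodup_nil (by simpa using hlim)]
  have h0 : (PySem.Dict.empty : PySem.Dict String String).items = [] := rfl
  have h1 : (PySem.Dict.empty : PySem.Dict String String).keys = [] := rfl
  have h2 : (PySem.Dict.empty : PySem.Dict String String).size = 0 := rfl
  rw [h0, h1, h2, List.nil_append, Nat.sub_zero, hdedup, hmapmap]
  -- B's side
  have hrkfstnd : (ranked.map (fun kv => kv.1)).Nodup := by
    have hperm : (ranked.map (fun kv => kv.1)).Perm (d.items.map (fun kv => kv.1)) :=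
      (hrkperm.trans hr0perm).map _
    exact hperm.nodup_iff.mpr hndm
  rw [if_pos hlim, PySem.List.slice_to _ (le_of_lt hlim)]
  rw [foldInsert_items (ranked.take limit.toNat) PySem.Dict.empty ?fresh ?ndp]
  case fresh => intro kv _ h; rw [h1] at h; simp at h
  case ndp =>
    rw [List.map_take]
    exact List.Sublist.nodup (List.take_sublist _ _) hrkfstnd
  rw [h0, List.nil_append, List.map_take]

theorem both_nil (pairs : List (String × String)) (corpus_counter : List (String × Int)) (limit : Int)
    (hC : candsOf (fun b => (PySem.Dict.ofList corpus_counter).getD b 0) pairs = [])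
    (hl : ¬ 0 < limit) :
    build_auto_typical_replacements pairs corpus_counter limit = []
      ∧ build_auto_typical_replacements_alt pairs corpus_counter limit = [] := by
  constructor
  · simp only [build_auto_typical_replacements]
    rw [foldA_eq, List.nil_append, hC]
    rfl
  · simp only [build_auto_typical_replacements_alt]
    rw [bfold_eq, hC]
    simp only [PySem.List.enumerate_nil, List.foldl_nil]
    rw [if_neg hl]
    rfl

-- ===== VERDICT (by name: the statement is the Claim_ definition above) =====
theorem build_auto_typical_replacements_spec : Claim_unchanged_build_auto_typical_replacements := by
  intro pairs corpus_counter limit _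
  unfold Spec_build_auto_typical_replacements
  intro hnD
  by_cases hl : 0 < limit
  · exact main_equiv pairs corpus_counter limit hl
  · have hC : candsOf (fun b => (PySem.Dict.ofList corpus_counter).getD b 0) pairs = [] := by
      rw [candsOf_eq_nil_iff]
      intro hex
      exact hnD ⟨by omega, hex⟩
    obtain ⟨hA, hB⟩ := both_nil pairs corpus_counter limit hC hl
    rw [hA, hB]

theorem build_auto_typical_replacements_changed : Claim_changed_build_auto_typical_replacements := by
  unfold Claim_changed_build_auto_typical_replacements; decide

theorem build_auto_typical_replacements_tight : Claim_exact_build_auto_typical_replacements := by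
  unfold Claim_exact_build_auto_typical_replacements
  intro pairs corpus_counter limit _ hD
  obtain ⟨hlim, hex⟩ := hD
  have hB : build_auto_typical_replacements_alt pairs corpus_counter limit = [] := by
    simp only [build_auto_typical_replacements_alt]
    rw [bfold_eq]
    dsimp only
    rw [if_neg (by omega : ¬ (0 : Int) < limit)]
    rfl
  have hCne : candsOf (fun b => (PySem.Dict.ofList corpus_counter).getD b 0) pairs ≠ [] := by
    intro h
    exact (candsOf_eq_nil_iff _ _).mp h hex
  have hA : build_auto_typical_replacements pairs corpus_counter limit ≠ [] := by
    simp only [build_auto_typical_replacements]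
    rw [foldA_eq, List.nil_append]
    have hSne : PySem.List.sorted2 (candsOf (fun b => (PySem.Dict.ofList corpus_counter).getD b 0) pairs)
        (fun x => x.2.2) (fun x => PySem.Str.len x.1) true ≠ [] := by
      intro h
      have hlen := (PySem.List.sorted2_perm (candsOf (fun b => (PySem.Dict.ofList corpus_counter).getD b 0) pairs)
        (fun x => x.2.2) (fun x => PySem.Str.len x.1) true).length_eq
      rw [h] at hlen
      exact hCne (List.length_eq_zero_iff.mp hlen.symm)
    obtain ⟨c, rest, hS⟩ := List.exists_cons_of_ne_nil hSne
    rw [hS]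
    simp only [selLoopA]
    rw [if_neg (by simp [PySem.Dict.contains_empty])]
    rw [if_pos ?lim]
    case lim =>
      have hsz : ((PySem.Dict.empty.insert c.1 c.2.1 : PySem.Dict String String).size : Int) = 1 := rfl
      rw [hsz]; omega
    have hit : (PySem.Dict.empty.insert c.1 c.2.1 : PySem.Dict String String).items
        = [(c.1, c.2.1)] := rfl
    rw [hit]
    simp
  rw [hB]
  exact hA
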